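-- pv_equiv track=rewrite | github.com/sidou06/hackerrank-solutions | Mathematics/Geometry/Hyperspace Travel/Solution.py | solve
-- ===== SOURCE A (Python) =====
-- def solve(friends):
--     # Initialize an empty list to store results
--     sol = []
--     # Get number of rows (n) and columns (m)
--     n = len(friends)
--     m = len(friends[0])
--
--     # Loop through each column (m)
--     for i in range(m):
--         # Initialize an empty list to store elements of the current column
--         line = []
--         # Loop through each row (n) and add the elements of the current column to 'line'
--         for j in range(n):
--             line.append(friends[j][i])
--
--         # Sort the elements in the column
--         line.sort()
--         # Append the median element (middle element after sorting) to 'sol'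
--         sol.append(line[(len(line) - 1) // 2])
--
--     # Return the final list of median values for each column
--     return sol
-- ===== SOURCE B (Python) =====
-- def solve(friends):
--     # per column: quickselect the (n-1)//2-th order statistic instead of sorting
--     def qsel(xs, k):
--         while True:
--             p = xs[0]
--             lt = [x for x in xs if x < p]
--             if k < len(lt):
--                 xs = lt
--                 continue
--             gt = [x for x in xs if x > p]
--             ne = len(xs) - len(gt)
--             if k < ne:
--                 return p
--             xs, k = gt, k - ne
--     m = len(friends[0])
--     k = (len(friends) - 1) // 2
--     return [qsel([row[i] for row in friends], k) for i in range(m)]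
-- ===== Notes on version B (the rewrite author's own statement) =====
-- stated objective: alternative
-- what changed: Per-column quickselect partition recursion finding the (n-1)//2-th order statistic directly, replacing sort-then-index on each column.
import Mathlib
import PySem

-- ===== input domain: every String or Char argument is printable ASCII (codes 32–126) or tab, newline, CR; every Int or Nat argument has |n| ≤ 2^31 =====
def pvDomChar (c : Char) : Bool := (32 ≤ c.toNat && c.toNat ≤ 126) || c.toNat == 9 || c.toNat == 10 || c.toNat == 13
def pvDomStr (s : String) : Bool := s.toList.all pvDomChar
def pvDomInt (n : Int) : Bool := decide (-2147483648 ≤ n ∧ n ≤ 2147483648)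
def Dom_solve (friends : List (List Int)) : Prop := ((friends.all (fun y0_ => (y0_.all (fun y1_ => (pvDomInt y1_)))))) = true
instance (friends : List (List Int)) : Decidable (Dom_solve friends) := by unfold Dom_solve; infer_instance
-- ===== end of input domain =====

-- B replaces each column's sort-then-index with a quickselect partition recursion
-- for the (n-1)//2-th order statistic: a different algorithm of similar cost.


-- ===== PORT A =====
def solve (friends : List (List Int)) : List Int :=
  let n := (friends.length : Int)
  let m := ((PySem.List.pyGetD friends 0 []).length : Int)
  (PySem.List.pyRange 0 m 1).foldl
    (fun sol i =>
      let line := (PySem.List.pyRange 0 n 1).foldl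
        (fun line j => line ++ [PySem.List.pyGetD (PySem.List.pyGetD friends j []) i 0]) []
      let line := PySem.List.sorted line (fun x => x) false
      sol ++ [PySem.List.pyGetD line (PySem.Int.floordiv ((line.length : Int) - 1) 2) 0]) []

-- ===== PORT B =====
-- quickselect: the while-loop of Source B as a tail recursion over the same state (xs, k)
def qsel : List Int → Int → Int
  | [], _ => 0  -- unreachable under Pre_ (columns are nonempty); Python xs[0] would raise there
  | p :: rest, k =>
    let xs := p :: rest
    let lt := xs.filter (fun x => decide (x < p))
    if k < (lt.length : Int) then qsel lt k
    else
      let gt := xs.filter (fun x => decide (p < x))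
      let ne := (xs.length : Int) - (gt.length : Int)
      if k < ne then p
      else qsel gt (k - ne)
termination_by xs _ => xs.length
decreasing_by
  · exact List.length_filter_lt_length_iff_exists.mpr ⟨p, List.mem_cons_self .., by simp⟩
  · exact List.length_filter_lt_length_iff_exists.mpr ⟨p, List.mem_cons_self .., by simp⟩

def solve_alt (friends : List (List Int)) : List Int :=
  let m := ((PySem.List.pyGetD friends 0 []).length : Int)
  let k := PySem.Int.floordiv ((friends.length : Int) - 1) 2
  (PySem.List.pyRange 0 m 1).map
    (fun i => qsel (friends.map (fun row => PySem.List.pyGetD row i 0)) k)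

-- ===== PRECONDITION & SPEC =====
-- Pre_ excludes exactly the inputs on which A raises IndexError: the empty matrix
-- (friends[0]) and matrices with a row shorter than the first row (friends[j][i]).
def Pre_solve (friends : List (List Int)) : Prop :=
  friends ≠ [] ∧ ∀ row ∈ friends, (friends.headD []).length ≤ row.length
instance (friends : List (List Int)) : Decidable (Pre_solve friends) := by
  unfold Pre_solve; infer_instance

def pvWitness_solve : List (List Int) := [[1, 2], [3, 4], [5, 6]]

def Spec_solve (friends : List (List Int)) (out : List Int) : Prop := out = solve_alt friends
instance (friends : List (List Int)) (out : List Int) : Decidable (Spec_solve friends out) := by unfold Spec_solve; infer_instance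

-- ===== CLAIM (what is proved, stated in full; the proofs are below) =====
def Claim_equal_solve : Prop := ∀ (friends : List (List Int)), Dom_solve friends → Pre_solve friends → Spec_solve friends (solve friends)

-- ===== LEMMAS AND PROOFS =====

-- the three partition pieces are a permutation of the list
lemma partition_perm (p : Int) (xs : List Int) :
    (xs.filter (fun x => decide (x < p)) ++ xs.filter (fun x => decide (x = p)) ++
      xs.filter (fun x => decide (p < x))).Perm xs := by
  rw [List.perm_iff_count]
  intro a
  simp only [List.count_append]
  have z : ∀ q : Int → Bool, q a = false → List.count a (xs.filter q) = 0 := by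
    intro q hq
    exact List.count_eq_zero.mpr (fun hm => by
      have := (List.mem_filter.mp hm).2
      rw [hq] at this
      exact Bool.false_ne_true this)
  rcases lt_trichotomy a p with h | h | h
  · have e1 := List.count_filter (l := xs) (p := fun x => decide (x < p)) (a := a) (by simpa using h)
    have e2 := z (fun x => decide (x = p)) (by simp; omega)
    have e3 := z (fun x => decide (p < x)) (by simp; omega)
    omega
  · subst h
    have e1 := z (fun x => decide (x < a)) (by simp)
    have e2 := List.count_filter (l := xs) (p := fun x => decide (x = a)) (a := a) (by simp)
    have e3 := z (fun x => decide (a < x)) (by simp)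
    omega
  · have e1 := z (fun x => decide (x < p)) (by simp; omega)
    have e2 := z (fun x => decide (x = p)) (by simp; omega)
    have e3 := List.count_filter (l := xs) (p := fun x => decide (p < x)) (a := a) (by simpa using h)
    omega

lemma partition_length (p : Int) (xs : List Int) :
    (xs.filter (fun x => decide (x < p))).length + (xs.filter (fun x => decide (x = p))).length +
      (xs.filter (fun x => decide (p < x))).length = xs.length := by
  have := (partition_perm p xs).length_eq
  simp only [List.length_append] at this
  omega

-- Python's stable sort splits at a pivot into (sorted <p) ++ (=p's) ++ (sorted >p)
lemma sorted_decomp (p : Int) (xs : List Int) :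
    PySem.List.sorted xs (fun x => x) false =
      PySem.List.sorted (xs.filter (fun x => decide (x < p))) (fun x => x) false ++
      xs.filter (fun x => decide (x = p)) ++
      PySem.List.sorted (xs.filter (fun x => decide (p < x))) (fun x => x) false := by
  apply PySem.List.sorted_id_eq_of_perm_of_pairwise
  · exact (((PySem.List.sorted_perm _ _ _).append
      (List.Perm.refl _)).append (PySem.List.sorted_perm _ _ _)).trans (partition_perm p xs)
  · apply List.pairwise_append.mpr
    refine ⟨List.pairwise_append.mpr ⟨?_, ?_, ?_⟩, ?_, ?_⟩
    · simpa using PySem.List.sorted_pairwise (xs.filter (fun x => decide (x < p))) (fun x => x) 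
    · exact List.Pairwise.imp (fun h => le_of_eq h)
        (List.Pairwise.imp_of_mem (fun ha hb _ => by
          simp only [List.mem_filter, decide_eq_true_eq] at ha hb; omega)
          (List.pairwise_of_forall (fun _ _ => trivial)))
    · intro a ha b hb
      have ha' := ((PySem.List.mem_sorted _ _ _ _).mp ha); have hb' := hb
      simp only [List.mem_filter, decide_eq_true_eq] at ha' hb'
      omega
    · simpa using PySem.List.sorted_pairwise (xs.filter (fun x => decide (p < x))) (fun x => x)
    · intro a ha b hb
      have hb' := ((PySem.List.mem_sorted _ _ _ _).mp hb)
      simp only [List.mem_append] at ha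
      rcases ha with ha | ha
      · have ha' := ((PySem.List.mem_sorted _ _ _ _).mp ha)
        simp only [List.mem_filter, decide_eq_true_eq] at ha' hb'
        omega
      · simp only [List.mem_filter, decide_eq_true_eq] at ha hb'
        omega

-- quickselect computes the k-th element of the sorted list
lemma qsel_eq (xs : List Int) (k : Int) (h0 : 0 ≤ k) (hk : k < (xs.length : Int)) :
    qsel xs k = (PySem.List.sorted xs (fun x => x) false).getD k.toNat 0 := by
  match xs with
  | [] => simp at hk; omega
  | p :: rest =>
    rw [qsel]
    set xs := p :: rest with hxs
    set lt := xs.filter (fun x => decide (x < p)) with hlt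
    set eqs := xs.filter (fun x => decide (x = p)) with heqs
    set gt := xs.filter (fun x => decide (p < x)) with hgt
    have hdec := sorted_decomp p xs
    rw [← hlt, ← heqs, ← hgt] at hdec
    have hlen := partition_length p xs
    rw [← hlt, ← heqs, ← hgt] at hlen
    have hslt : (PySem.List.sorted lt (fun x => x) false).length = lt.length :=
      (PySem.List.sorted_perm _ _ _).length_eq
    have hsgt : (PySem.List.sorted gt (fun x => x) false).length = gt.length :=
      (PySem.List.sorted_perm _ _ _).length_eq
    by_cases h1 : k < (lt.length : Int)
    · rw [if_pos h1, qsel_eq lt k h0 h1, hdec]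
      have hk' : k.toNat < (PySem.List.sorted lt (fun x => x) false).length := by
        rw [hslt]; omega
      rw [List.getD_eq_getElem?_getD, List.getD_eq_getElem?_getD,
        List.append_assoc, List.getElem?_append_left hk']
    · rw [if_neg h1]
      by_cases h2 : k < (xs.length : Int) - (gt.length : Int)
      · rw [if_pos h2, hdec]
        have hk' : k.toNat < (PySem.List.sorted lt (fun x => x) false).length + eqs.length := by
          rw [hslt]; omega
        have hk'' : (PySem.List.sorted lt (fun x => x) false).length ≤ k.toNat := by
          rw [hslt]; omega
        rw [List.getD_eq_getElem?_getD, List.append_assoc,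
          List.getElem?_append_right hk'', List.getElem?_append_left (by omega)]
        have heqp : ∀ x ∈ eqs, x = p := by
          intro x hx
          rw [heqs] at hx
          simpa using (List.mem_filter.mp hx).2
        rw [List.getElem?_eq_getElem (by omega)]
        simp only [Option.getD_some]
        exact (heqp _ (List.getElem_mem _)).symm
      · rw [if_neg h2]
        have h0' : 0 ≤ k - ((xs.length : Int) - (gt.length : Int)) := by omega
        have hk2 : k - ((xs.length : Int) - (gt.length : Int)) < (gt.length : Int) := by
          omega
        rw [qsel_eq gt _ h0' hk2, hdec]
        have hge : (PySem.List.sorted lt (fun x => x) false ++ eqs).length ≤ k.toNat := by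
          simp only [List.length_append, hslt]; omega
        have hix : k.toNat - (PySem.List.sorted lt (fun x => x) false ++ eqs).length =
            (k - ((xs.length : Int) - (gt.length : Int))).toNat := by
          simp only [List.length_append, hslt]; omega
        rw [List.getD_eq_getElem?_getD, List.getD_eq_getElem?_getD,
          List.getElem?_append_right hge, hix]
termination_by xs.length
decreasing_by
  all_goals exact List.length_filter_lt_length_iff_exists.mpr ⟨p, List.mem_cons_self .., by simp⟩

-- ===== VERDICT (by name: the statement is the Claim_ definition above) =====
theorem solve_spec : Claim_equal_solve := by
  intro friends _ hpre
  obtain ⟨hne, _⟩ := hpre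
  unfold Spec_solve solve solve_alt
  have hn : 0 < friends.length := List.length_pos_iff.mpr hne
  rw [PySem.List.foldl_append_singleton_eq_map]
  simp only [List.nil_append]
  apply List.map_congr_left
  intro i _
  -- the inner loop builds exactly column i
  rw [PySem.List.foldl_append_singleton_eq_map, List.nil_append]
  have hcoleq : List.map (fun j => PySem.List.pyGetD (PySem.List.pyGetD friends j []) i 0)
      (PySem.List.pyRange 0 (friends.length : Int) 1) =
      friends.map (fun row => PySem.List.pyGetD row i 0) := by
    conv_rhs => rw [← PySem.List.map_pyGetD_pyRange_zero' friends ([] : List Int)]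
    rw [List.map_map]
    rfl
  rw [hcoleq]
  set col := friends.map (fun row => PySem.List.pyGetD row i 0) with hcol
  have hcl : col.length = friends.length := List.length_map ..
  have hsl : (PySem.List.sorted col (fun x => x) false).length = col.length :=
    (PySem.List.sorted_perm _ _ _).length_eq
  set k := PySem.Int.floordiv ((friends.length : Int) - 1) 2 with hk
  have hkd : k = ((friends.length : Int) - 1) / 2 :=
    PySem.Int.floordiv_eq_ediv_of_pos (by omega)
  have h0 : 0 ≤ k := by rw [hkd]; omega
  have hlt : k < (friends.length : Int) := by rw [hkd]; omega
  have hidx : PySem.Int.floordiv (((PySem.List.sorted col (fun x => x) false).length : Int) - 1) 2 = k := by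
    rw [hsl, hcl]
  rw [hidx, show k = ((k.toNat : ℕ) : ℤ) by omega, PySem.List.pyGetD_natCast,
    qsel_eq col ((k.toNat : ℕ) : ℤ) (by omega) (by rw [hcl]; omega)]
  rw [Int.toNat_natCast]
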